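-- pv_equiv track=rewrite | github.com/hempnall/aoc2022 | day17/a.py | compare_areas
-- ===== SOURCE A (Python) =====
-- def compare_areas(still_rocks,start_height,period):
--     if period == 1:
--         return False
--     for diff in range(period):
--         for w in range(7):
--             start_per_coord=(w ,start_height + diff)
--             end_per_coord=(w,start_height + period + diff)
--             if start_per_coord in still_rocks and not end_per_coord in still_rocks:
--                 return False
--             if start_per_coord not in still_rocks and end_per_coord in still_rocks:
--                 return False
--     return True
-- ===== SOURCE B (Python) =====
-- def compare_areas(still_rocks, start_height, period):
--     if period == 1:
--         return False
--     rocks = set(still_rocks)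
--     for (w, y) in still_rocks:
--         if 0 <= w < 7:
--             if start_height <= y < start_height + period and (w, y + period) not in rocks:
--                 return False
--             if start_height + period <= y < start_height + period + period and (w, y - period) not in rocks:
--                 return False
--     return True
-- ===== Notes on version B (the rewrite author's own statement) =====
-- stated objective: faster
-- what changed: Instead of scanning every cell of both bands with an XOR membership test against the rock list (O(period*7) probes, each O(n)), B hashes the rocks into a set once and makes a single pass over the rocks themselves, checking that each in-band rock has its period-shifted partner; work is O(n) independent of period.
import Mathlib
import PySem

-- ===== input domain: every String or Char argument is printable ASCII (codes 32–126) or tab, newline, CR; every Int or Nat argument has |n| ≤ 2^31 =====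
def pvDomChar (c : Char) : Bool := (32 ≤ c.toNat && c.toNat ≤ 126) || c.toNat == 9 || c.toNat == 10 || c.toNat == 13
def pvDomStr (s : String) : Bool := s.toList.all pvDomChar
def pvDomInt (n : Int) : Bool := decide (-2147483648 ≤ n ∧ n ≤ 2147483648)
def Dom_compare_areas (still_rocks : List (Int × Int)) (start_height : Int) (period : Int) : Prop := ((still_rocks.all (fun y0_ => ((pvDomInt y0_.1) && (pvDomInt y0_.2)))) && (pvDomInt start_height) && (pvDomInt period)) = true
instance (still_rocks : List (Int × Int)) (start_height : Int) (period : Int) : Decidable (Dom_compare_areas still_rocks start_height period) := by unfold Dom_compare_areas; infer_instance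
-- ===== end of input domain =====

-- B replaces A's cell-by-cell XOR membership scan over both bands with a single pass
-- over the rocks themselves (hashed into a set once), checking each in-band rock's
-- period-shifted partner (alternative algorithm; no speed claim made here).

-- ===== PORT A =====
-- inner 'for w in range(7)' loop: returns false on the first bad cell, true if none
def pvLoopW (still_rocks : List (Int × Int)) (start_height period diff : Int) : List Int → Bool
  | [] => true
  | w :: ws =>
    let start_per_coord := (w, start_height + diff)
    let end_per_coord := (w, start_height + period + diff)
    if still_rocks.contains start_per_coord && !still_rocks.contains end_per_coord then false
    else if !still_rocks.contains start_per_coord && still_rocks.contains end_per_coord then false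
    else pvLoopW still_rocks start_height period diff ws

-- outer 'for diff in range(period)' loop
def pvLoopDiff (still_rocks : List (Int × Int)) (start_height period : Int) : List Int → Bool
  | [] => true
  | d :: ds =>
    if pvLoopW still_rocks start_height period d (PySem.List.pyRange 0 7 1) then
      pvLoopDiff still_rocks start_height period ds
    else false

def compare_areas (still_rocks : List (Int × Int)) (start_height : Int) (period : Int) : Bool :=
  if period == 1 then false
  else pvLoopDiff still_rocks start_height period (PySem.List.pyRange 0 period 1)

-- ===== PORT B =====
-- 'for (w, y) in still_rocks' loop: each in-band rock must have its shifted partner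
def pvScan (rocks : PySem.Set (Int × Int)) (start_height period : Int) : List (Int × Int) → Bool
  | [] => true
  | (w, y) :: rest =>
    if 0 ≤ w ∧ w < 7 then
      if (start_height ≤ y ∧ y < start_height + period) ∧
          ¬ PySem.Set.contains rocks (w, y + period) = true then false
      else if (start_height + period ≤ y ∧ y < start_height + period + period) ∧
          ¬ PySem.Set.contains rocks (w, y - period) = true then false
      else pvScan rocks start_height period rest
    else pvScan rocks start_height period rest

def compare_areas_alt (still_rocks : List (Int × Int)) (start_height : Int) (period : Int) : Bool :=
  if period == 1 then false
  else
    let rocks : PySem.Set (Int × Int) := PySem.Set.ofList still_rocks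
    pvScan rocks start_height period still_rocks

-- ===== PRECONDITION & SPEC =====
def Spec_compare_areas (still_rocks : List (Int × Int)) (start_height : Int) (period : Int) (out : Bool) : Prop := out = compare_areas_alt still_rocks start_height period
instance (still_rocks : List (Int × Int)) (start_height : Int) (period : Int) (out : Bool) : Decidable (Spec_compare_areas still_rocks start_height period out) := by unfold Spec_compare_areas; infer_instance

-- ===== CLAIM (what is proved, stated in full; the proofs are below) =====
def Claim_equal_compare_areas : Prop := ∀ (still_rocks : List (Int × Int)) (start_height : Int) (period : Int), Dom_compare_areas still_rocks start_height period → Spec_compare_areas still_rocks start_height period (compare_areas still_rocks start_height period)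

-- ===== LEMMAS AND PROOFS =====

lemma pvLoopW_iff (sr : List (Int × Int)) (sh per diff : Int) (ws : List Int) :
    pvLoopW sr sh per diff ws = true ↔
      ∀ w ∈ ws, ((w, sh + diff) ∈ sr ↔ (w, sh + per + diff) ∈ sr) := by
  induction ws with
  | nil => simp [pvLoopW]
  | cons w ws ih =>
    simp only [pvLoopW, List.mem_cons]
    by_cases h1 : (w, sh + diff) ∈ sr <;> by_cases h2 : (w, sh + per + diff) ∈ sr <;>
      simp [h1, h2, ih]

lemma pvLoopDiff_iff (sr : List (Int × Int)) (sh per : Int) (ds : List Int) :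
    pvLoopDiff sr sh per ds = true ↔
      ∀ d ∈ ds, ∀ w ∈ PySem.List.pyRange 0 7 1,
        ((w, sh + d) ∈ sr ↔ (w, sh + per + d) ∈ sr) := by
  induction ds with
  | nil => simp [pvLoopDiff]
  | cons d ds ih =>
    unfold pvLoopDiff
    by_cases h : pvLoopW sr sh per d (PySem.List.pyRange 0 7 1) = true
    · rw [if_pos h, ih, pvLoopW_iff] at *
      constructor
      · intro ha d' hd'
        rcases List.mem_cons.mp hd' with rfl | hd'
        · exact h
        · exact ha d' hd'
      · intro ha d' hd'
        exact ha d' (List.mem_cons_of_mem _ hd')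
    · rw [if_neg h]
      simp only [Bool.false_eq_true, false_iff]
      intro hall
      apply h
      rw [pvLoopW_iff]
      exact hall d (List.mem_cons_self ..)

lemma pvScan_iff (rocks : PySem.Set (Int × Int)) (sh per : Int) (l : List (Int × Int)) :
    pvScan rocks sh per l = true ↔
      ∀ p ∈ l, (0 ≤ p.1 ∧ p.1 < 7) →
        ((sh ≤ p.2 ∧ p.2 < sh + per) → PySem.Set.contains rocks (p.1, p.2 + per) = true) ∧
        ((sh + per ≤ p.2 ∧ p.2 < sh + per + per) → PySem.Set.contains rocks (p.1, p.2 - per) = true) := by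
  induction l with
  | nil => simp [pvScan]
  | cons p rest ih =>
    obtain ⟨w, y⟩ := p
    simp only [pvScan, List.mem_cons]
    by_cases hw : 0 ≤ w ∧ w < 7
    · rw [if_pos hw]
      by_cases h1 : (sh ≤ y ∧ y < sh + per) ∧ ¬ PySem.Set.contains rocks (w, y + per) = true
      · rw [if_pos h1]
        simp only [Bool.false_eq_true, false_iff]
        intro hall
        exact h1.2 ((hall (w, y) (Or.inl rfl) hw).1 h1.1)
      · rw [if_neg h1]
        by_cases h2 : (sh + per ≤ y ∧ y < sh + per + per) ∧ ¬ PySem.Set.contains rocks (w, y - per) = true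
        · rw [if_pos h2]
          simp only [Bool.false_eq_true, false_iff]
          intro hall
          exact h2.2 ((hall (w, y) (Or.inl rfl) hw).2 h2.1)
        · rw [if_neg h2, ih]
          constructor
          · intro ha q hq
            rcases hq with rfl | hq
            · intro _
              constructor
              · intro hr
                by_contra hc
                exact h1 ⟨hr, hc⟩
              · intro hr
                by_contra hc
                exact h2 ⟨hr, hc⟩
            · exact ha q hq
          · intro ha q hq
            exact ha q (Or.inr hq)
    · rw [if_neg hw, ih]
      constructor
      · intro ha q hq
        rcases hq with rfl | hq
        · intro hc
          exact absurd hc hw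
        · exact ha q hq
      · intro ha q hq
        exact ha q (Or.inr hq)

theorem compare_areas_spec : Claim_equal_compare_areas := by
  intro sr sh per _
  unfold Spec_compare_areas compare_areas compare_areas_alt
  by_cases hp : per == 1
  · simp [hp]
  · simp only [hp, Bool.false_eq_true, if_false]
    rw [Bool.eq_iff_iff, pvLoopDiff_iff, pvScan_iff]
    simp only [PySem.Set.contains_iff, PySem.Set.mem_ofList, PySem.List.mem_pyRange_one]
    constructor
    · -- A's cell condition → B's rock condition
      intro hA p hp' hw
      constructor
      · intro hy
        have h := (hA (p.2 - sh) (by omega) p.1 (by omega)).mp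
        have : (p.1, sh + (p.2 - sh)) ∈ sr := by
          have : sh + (p.2 - sh) = p.2 := by ring
          rw [this]
          exact hp'
        have h2 := h this
        have he : sh + per + (p.2 - sh) = p.2 + per := by ring
        rwa [he] at h2
      · intro hy
        have h := (hA (p.2 - sh - per) (by omega) p.1 (by omega)).mpr
        have : (p.1, sh + per + (p.2 - sh - per)) ∈ sr := by
          have : sh + per + (p.2 - sh - per) = p.2 := by ring
          rw [this]
          exact hp'
        have h2 := h this
        have he : sh + (p.2 - sh - per) = p.2 - per := by ring
        rwa [he] at h2
    · -- B's rock condition → A's cell condition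
      intro hB d hd w hw
      constructor
      · intro hs
        have h := (hB (w, sh + d) hs (by simpa using hw)).1 (by simp; omega)
        have he : sh + d + per = sh + per + d := by ring
        rwa [he] at h
      · intro he
        have h := (hB (w, sh + per + d) he (by simpa using hw)).2 (by simp; omega)
        have heq : sh + per + d - per = sh + d := by ring
        rwa [heq] at h
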